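-- pv_equiv track=rewrite | github.com/TheBoss313/hw | static/proj1/athens_caesar.py | get_divisors_number
-- ===== SOURCE A (Python) =====
-- def get_divisors_number(number):
--     divisors_number = []
--     divisors_number_result = []
--     for i in range(2, number + 1):
--         if number % i == 0:
--             divisors_number.append(i)
--             continue
--         for j in divisors_number:
--             if i % j == 0:
--                 divisors_number_result.append(i)
--
--     for i in divisors_number:
--         divisors_number_result.append(i)
--
--     divisors_number_result.sort()
--
--     return divisors_number_result
-- ===== SOURCE B (Python) =====
-- def get_divisors_number(number):
--     divisors = [d for d in range(2, number + 1) if number % d == 0]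
--     result = list(divisors)
--     for j in divisors:
--         for m in range(2 * j, number + 1, j):
--             if number % m != 0:
--                 result.append(m)
--     result.sort()
--     return result
-- ===== Notes on version B (the rewrite author's own statement) =====
-- stated objective: faster
-- what changed: A scans the whole list of collected divisors once per candidate i (inner loop over divisors for every non-divisor i); B enumerates the divisors once and then walks each divisor's multiples directly with stepped ranges, so the per-i inner scan disappears.
import Mathlib
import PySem

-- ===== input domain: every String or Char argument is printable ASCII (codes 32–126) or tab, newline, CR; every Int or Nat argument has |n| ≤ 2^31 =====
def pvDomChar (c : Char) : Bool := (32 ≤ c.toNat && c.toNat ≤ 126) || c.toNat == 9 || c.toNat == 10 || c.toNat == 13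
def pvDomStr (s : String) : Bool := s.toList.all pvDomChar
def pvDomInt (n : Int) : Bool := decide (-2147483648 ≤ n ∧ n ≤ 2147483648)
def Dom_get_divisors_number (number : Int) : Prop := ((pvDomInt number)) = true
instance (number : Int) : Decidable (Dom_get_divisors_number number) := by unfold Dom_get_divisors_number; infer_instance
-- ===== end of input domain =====

-- B replaces A's per-i scan over all collected divisors by one walk over each divisor's
-- multiples (stepped ranges), removing the inner scan; objective: faster.

-- ===== PORT A =====
-- loop body of A's main 'for i in range(2, number+1)' loop (state = (divisors_number, divisors_number_result))
def pvStepA (number : Int) (st : List Int × List Int) (i : Int) : List Int × List Int :=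
  if PySem.Int.mod number i == 0 then (st.1 ++ [i], st.2)
  else (st.1, st.1.foldl (fun r j => if PySem.Int.mod i j == 0 then r ++ [i] else r) st.2)

def get_divisors_number (number : Int) : List Int :=
  let st := (PySem.List.pyRange 2 (number + 1) 1).foldl (pvStepA number) ([], [])
  let res := st.1.foldl (fun r i => r ++ [i]) st.2
  PySem.List.sorted res (fun x => x) false

-- ===== PORT B =====
def get_divisors_number_alt (number : Int) : List Int :=
  let divisors := (PySem.List.pyRange 2 (number + 1) 1).filter
    (fun d => PySem.Int.mod number d == 0)
  let result := divisors.foldl (fun r j =>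
      (PySem.List.pyRange (2 * j) (number + 1) j).foldl
        (fun r2 m => if PySem.Int.mod number m ≠ 0 then r2 ++ [m] else r2) r)
    divisors
  PySem.List.sorted result (fun x => x) false

-- ===== PRECONDITION & SPEC =====
def Spec_get_divisors_number (number : Int) (out : List Int) : Prop := out = get_divisors_number_alt number
instance (number : Int) (out : List Int) : Decidable (Spec_get_divisors_number number out) := by unfold Spec_get_divisors_number; infer_instance

-- ===== CLAIM (what is proved, stated in full; the proofs are below) =====
def Claim_equal_get_divisors_number : Prop := ∀ (number : Int), Dom_get_divisors_number number → Spec_get_divisors_number number (get_divisors_number number)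

-- ===== LEMMAS AND PROOFS =====

-- divisors of n in [2, m) in increasing order
def pvDivs (n m : Int) : List Int :=
  (PySem.List.pyRange 2 m 1).filter (fun i => PySem.Int.mod n i == 0)

-- what A's main loop appends to divisors_number_result at iteration i
def pvContrib (n i : Int) : List Int :=
  if PySem.Int.mod n i == 0 then []
  else ((pvDivs n i).filter (fun j => PySem.Int.mod i j == 0)).map (fun _ => i)

-- what B's inner loop appends for divisor j
def pvMult (n j : Int) : List Int :=
  (PySem.List.pyRange (2 * j) (n + 1) j).filter (fun m => decide (PySem.Int.mod n m ≠ 0))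

lemma pvStepA_eq (n : Int) (st : List Int × List Int) (i : Int) :
    pvStepA n st i =
      if PySem.Int.mod n i == 0 then (st.1 ++ [i], st.2)
      else (st.1, st.2 ++ (st.1.filter (fun j => PySem.Int.mod i j == 0)).map (fun _ => i)) := by
  unfold pvStepA
  split_ifs with h
  · rfl
  · rw [PySem.List.foldl_append_if (fun j => PySem.Int.mod i j == 0) (fun _ => i)]

-- A's main loop characterised: divisors collected + per-i contributions
lemma loopA (n : Int) (k : Nat) :
    (PySem.List.pyRange 2 (2 + (k : Int)) 1).foldl (pvStepA n) ([], []) =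
      (pvDivs n (2 + (k : Int)),
       (PySem.List.pyRange 2 (2 + (k : Int)) 1).flatMap (pvContrib n)) := by
  induction k with
  | zero =>
      simp [pvDivs]
  | succ k ih =>
      have hsplit : PySem.List.pyRange 2 (2 + ((k+1 : Nat) : Int)) 1 =
          PySem.List.pyRange 2 (2 + (k : Int)) 1 ++ [2 + (k : Int)] := by
        have : (2 + ((k+1 : Nat) : Int)) = (2 + (k : Int)) + 1 := by push_cast; ring
        rw [this, PySem.List.pyRange_one_succ_right (by omega)]
      rw [hsplit, List.foldl_append, ih, List.foldl_cons, List.foldl_nil, pvStepA_eq]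
      have hdv : pvDivs n (2 + ((k+1 : Nat) : Int)) =
          pvDivs n (2 + (k : Int)) ++
            List.filter (fun i => PySem.Int.mod n i == 0) [2 + (k : Int)] := by
        unfold pvDivs
        rw [hsplit, List.filter_append]
      rw [hdv, List.flatMap_append]
      by_cases h : PySem.Int.mod n (2 + (k : Int)) == 0
      · simp [h, pvContrib, List.filter_nil]
      · simp [h, pvContrib, List.filter_nil]

-- length of a constant-map list counted
lemma count_map_const (v i : Int) (xs : List Int) :
    ((xs.map (fun _ => i)).count v) = if i = v then xs.length else 0 := by
  rw [List.map_const', List.count_replicate]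
  simp

-- counting v in a flatMap where each block is empty except possibly at a = v
lemma count_flatMap_single (v : Int) (N : Nat) (f : Int → List Int) :
    ∀ (l : List Int), l.Nodup → (∀ a ∈ l, (f a).count v = if a = v then N else 0) →
      ((l.flatMap f).count v) = if v ∈ l then N else 0 := by
  intro l
  induction l with
  | nil => intro _ _; simp
  | cons a t ih =>
      intro hnd h
      rw [List.flatMap_cons, List.count_append]
      rcases List.nodup_cons.mp hnd with ⟨hna, hnt⟩
      have ha := h a (by simp)
      by_cases hav : a = v
      · subst hav
        have ht : (t.flatMap f).count a = 0 := by
          rw [ih hnt (fun b hb => h b (by simp [hb]))]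
          simp [hna]
        simp [ha, ht]
      · have ht := ih hnt (fun b hb => h b (by simp [hb]))
        simp only [if_neg hav] at ha
        rw [ha, ht]
        by_cases hv : v ∈ t <;> simp [hv, Ne.symm hav]

-- counting v in a flatMap where each block contains v at most once
lemma count_flatMap_countP (v : Int) (f : Int → List Int) (p : Int → Bool) :
    ∀ (l : List Int), (∀ a ∈ l, (f a).count v = if p a then 1 else 0) →
      ((l.flatMap f).count v) = l.countP p := by
  intro l
  induction l with
  | nil => intro _; simp
  | cons a t ih =>
      intro h
      rw [List.flatMap_cons, List.count_append, List.countP_cons,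
        h a (by simp), ih (fun b hb => h b (by simp [hb]))]
      by_cases hp : p a <;> simp [hp, Nat.add_comm]

lemma nodup_pyRange_pos (a b s : Int) (hs : 0 < s) :
    (PySem.List.pyRange a b s).Nodup := by
  rw [PySem.List.pyRange_of_pos a b hs]
  refine List.Nodup.map ?_ (List.nodup_range)
  intro x y hxy
  have : (x : Int) = y := by
    have := hxy
    nlinarith [this]
  exact_mod_cast this

lemma count_pyRange_pos (v a b s : Int) (hs : 0 < s) :
    ((PySem.List.pyRange a b s).count v) =
      if v ∈ PySem.List.pyRange a b s then 1 else 0 := by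
  by_cases hv : v ∈ PySem.List.pyRange a b s
  · rw [List.count_eq_one_of_mem (nodup_pyRange_pos a b s hs) hv]; simp [hv]
  · rw [List.count_eq_zero_of_not_mem hv]; simp [hv]

-- members of pvDivs are divisors of n in [2, m)
lemma mem_pvDivs {n m j : Int} (h : j ∈ pvDivs n m) :
    2 ≤ j ∧ j < m ∧ j ∣ n := by
  unfold pvDivs at h
  rw [List.mem_filter, PySem.List.mem_pyRange_one] at h
  refine ⟨h.1.1, h.1.2, ?_⟩
  have := h.2
  simpa [PySem.Int.mod_eq_zero_iff_dvd] using this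

-- count of v among B's appended multiples of j
lemma count_pvMult (n j v : Int) (hj : 2 ≤ j) :
    ((pvMult n j).count v) =
      if decide (PySem.Int.mod n v ≠ 0) && decide (v ∈ PySem.List.pyRange (2*j) (n+1) j) then 1 else 0 := by
  unfold pvMult
  by_cases hm : PySem.Int.mod n v ≠ 0
  · rw [List.count_filter (by simp [hm])]
    rw [count_pyRange_pos v _ _ j (by omega)]
    by_cases hv : v ∈ PySem.List.pyRange (2*j) (n+1) j <;> simp [hv, hm]
  · have : v ∉ (PySem.List.pyRange (2*j) (n+1) j).filter (fun m => decide (PySem.Int.mod n m ≠ 0)) := by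
      intro hvf
      rcases List.mem_filter.mp hvf with ⟨_, h2⟩
      simp at h2
      exact hm (by simp [h2])
    rw [List.count_eq_zero_of_not_mem this]
    simp [hm]

-- the key counting identity: A's contributions and B's multiples are a permutation
lemma core_perm (n : Int) :
    ((PySem.List.pyRange 2 (n+1) 1).flatMap (pvContrib n)).Perm
      ((pvDivs n (n+1)).flatMap (pvMult n)) := by
  rw [List.perm_iff_count]
  intro v
  -- left count
  set N : Nat := if PySem.Int.mod n v == 0 then 0
    else ((pvDivs n v).filter (fun j => PySem.Int.mod v j == 0)).length with hN
  have hL : ((PySem.List.pyRange 2 (n+1) 1).flatMap (pvContrib n)).count v =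
      if v ∈ PySem.List.pyRange 2 (n+1) 1 then N else 0 := by
    apply count_flatMap_single v N (pvContrib n) _ (PySem.List.nodup_pyRange_one 2 (n+1))
    intro a _
    unfold pvContrib
    by_cases hav : a = v
    · subst hav
      by_cases h : PySem.Int.mod n a == 0 <;>
        simp [h, hN, count_map_const, List.count_replicate]
    · by_cases h : PySem.Int.mod n a == 0 <;>
        simp [h, hav, count_map_const, List.count_replicate]
  -- right count
  have hR : ((pvDivs n (n+1)).flatMap (pvMult n)).count v =
      (pvDivs n (n+1)).countP
        (fun j => decide (PySem.Int.mod n v ≠ 0) && decide (v ∈ PySem.List.pyRange (2*j) (n+1) j)) := by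
    apply count_flatMap_countP
    intro a ha
    exact count_pvMult n a v (mem_pvDivs ha).1
  rw [hL, hR]
  by_cases hm : PySem.Int.mod n v = 0
  · -- v divides n (or rather n mod v = 0): both sides 0
    have hz : (pvDivs n (n+1)).countP
        (fun j => decide (PySem.Int.mod n v ≠ 0) && decide (v ∈ PySem.List.pyRange (2*j) (n+1) j)) = 0 := by
      rw [List.countP_eq_zero]
      intro j _
      simp [hm]
    rw [hz]
    simp [hN, hm]
  · by_cases hv : v ∈ PySem.List.pyRange 2 (n+1) 1
    · -- main case : 2 ≤ v ≤ n, v not a divisor of n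
      rcases PySem.List.mem_pyRange_one.mp hv with ⟨hv2, hvn⟩
      simp only [if_pos hv]
      have hsplit : pvDivs n (n+1) = pvDivs n v ++
          (PySem.List.pyRange v (n+1) 1).filter (fun i => PySem.Int.mod n i == 0) := by
        unfold pvDivs
        rw [PySem.List.pyRange_one_append 2 v (n+1) (by omega) (by omega), List.filter_append]
      rw [hsplit, List.countP_append]
      have htail : ((PySem.List.pyRange v (n+1) 1).filter (fun i => PySem.Int.mod n i == 0)).countP
          (fun j => decide (PySem.Int.mod n v ≠ 0) && decide (v ∈ PySem.List.pyRange (2*j) (n+1) j)) = 0 := by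
        rw [List.countP_eq_zero]
        intro j hj
        rcases List.mem_filter.mp hj with ⟨hjr, _⟩
        rcases PySem.List.mem_pyRange_one.mp hjr with ⟨hjv, _⟩
        -- j ≥ v, so 2*j > v and v cannot lie in range(2*j, n+1, j)
        simp only [Bool.and_eq_true, decide_eq_true_eq]
        rintro ⟨-, hvr⟩
        rcases (PySem.List.mem_pyRange_iff_of_pos (by omega : (0:Int) < j) v).mp hvr with ⟨h1, -, -⟩
        omega
      rw [htail, Nat.add_zero]
      have hhead : (pvDivs n v).countP
          (fun j => decide (PySem.Int.mod n v ≠ 0) && decide (v ∈ PySem.List.pyRange (2*j) (n+1) j)) =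
          (pvDivs n v).countP (fun j => PySem.Int.mod v j == 0) := by
        apply List.countP_congr
        intro j hj
        rcases mem_pvDivs hj with ⟨hj2, hjv, _⟩
        simp only [Bool.and_eq_true, decide_eq_true_eq, beq_iff_eq,
          PySem.Int.mod_eq_zero_iff_dvd]
        constructor
        · rintro ⟨-, hvr⟩
          rcases (PySem.List.mem_pyRange_iff_of_pos (by omega : (0:Int) < j) v).mp hvr with ⟨-, -, hdvd⟩
          -- j ∣ v - 2*j → j ∣ v
          have : v = (v - 2*j) + j * 2 := by ring
          rw [this]
          exact dvd_add hdvd ⟨2, rfl⟩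
        · intro hdvd
          refine ⟨hm, (PySem.List.mem_pyRange_iff_of_pos (by omega : (0:Int) < j) v).mpr ⟨?_, by omega, ?_⟩⟩
          · -- j ∣ v, 0 < j < v  ⇒  2*j ≤ v
            rcases hdvd with ⟨q, hq⟩
            have hq2 : 2 ≤ q := by nlinarith
            nlinarith
          · exact dvd_sub hdvd ⟨2, by ring⟩
      rw [hhead, List.countP_eq_length_filter]
      simp [hN, hm]
    · -- v outside [2, n+1): both sides 0
      simp only [if_neg hv]
      rw [Eq.comm, List.countP_eq_zero]
      intro j hj
      rcases mem_pvDivs hj with ⟨hj2, hjn, _⟩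
      simp only [Bool.and_eq_true, decide_eq_true_eq]
      rintro ⟨-, hvr⟩
      rcases (PySem.List.mem_pyRange_iff_of_pos (by omega : (0:Int) < j) v).mp hvr with ⟨h1, h2, -⟩
      rw [PySem.List.mem_pyRange_one] at hv
      omega

-- B's result before sorting
lemma altB (n : Int) :
    (pvDivs n (n+1)).foldl (fun r j =>
        (PySem.List.pyRange (2 * j) (n + 1) j).foldl
          (fun r2 m => if PySem.Int.mod n m ≠ 0 then r2 ++ [m] else r2) r)
      (pvDivs n (n+1)) =
      pvDivs n (n+1) ++ (pvDivs n (n+1)).flatMap (pvMult n) := by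
  have hbody : (fun (r : List Int) (j : Int) =>
      (PySem.List.pyRange (2 * j) (n + 1) j).foldl
        (fun r2 m => if PySem.Int.mod n m ≠ 0 then r2 ++ [m] else r2) r) =
      (fun r j => r ++ pvMult n j) := by
    funext r j
    rw [PySem.List.foldl_append_ite_eq_filter]
    rfl
  rw [hbody, PySem.List.foldl_append_eq_flatMap]

-- ===== VERDICT (by name: the statement is the Claim_ definition above) =====
theorem get_divisors_number_spec : Claim_equal_get_divisors_number := by
  intro n _
  unfold Spec_get_divisors_number get_divisors_number get_divisors_number_alt
  show PySem.List.sorted _ _ _ = PySem.List.sorted _ _ _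
  rw [PySem.List.foldl_append_singleton_eq_self]
  have hdiv : List.filter (fun d => PySem.Int.mod n d == 0) (PySem.List.pyRange 2 (n + 1) 1) =
      pvDivs n (n + 1) := rfl
  rw [hdiv, altB n]
  rw [PySem.List.sorted_id_eq_sorted_id_iff_perm]
  by_cases hn : n ≤ 1
  · have hnil : PySem.List.pyRange 2 (n+1) 1 = [] :=
      PySem.List.pyRange_one_eq_nil (by omega)
    simp [hnil, pvDivs]
  · have hk : (n + 1) = 2 + (((n - 1).toNat : Nat) : Int) := by omega
    rw [hk, loopA n ((n-1).toNat)]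
    rw [← hk]
    exact List.Perm.trans List.perm_append_comm
      (List.Perm.append_left _ (core_perm n))
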